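-- pv_equiv track=rewrite | github.com/MatejCuljak/p-faks | zad3.py | rang_ocjena
-- ===== SOURCE A (Python) =====
-- def rang_ocjena(ocjene):
--     rang = {
--         "Nedovoljan": 0,
--         "Dovoljan": 0,
--         "Dobar": 0,
--         "Vrlodobar": 0,
--         "Izvrstan": 0
--     }
--
--     for ocjena in ocjene:
--         if ocjena < 50:
--             rang["Nedovoljan"] += 1
--         elif ocjena < 65:
--             rang["Dovoljan"] += 1
--         elif ocjena < 80:
--             rang["Dobar"] += 1
--         elif ocjena < 90:
--             rang["Vrlodobar"] += 1
--         else: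
--             rang["Izvrstan"] += 1
--
--     return rang
-- ===== SOURCE B (Python) =====
-- def rang_ocjena(ocjene):
--     names = ["Nedovoljan", "Dovoljan", "Dobar", "Vrlodobar", "Izvrstan"]
--     cuts = [sum(1 for x in ocjene if x < t) for t in (50, 65, 80, 90)]
--     cuts = [0] + cuts + [len(ocjene)]
--     return {name: hi - lo for name, lo, hi in zip(names, cuts, cuts[1:])}
-- ===== Notes on version B (the rewrite author's own statement) =====
-- stated objective: alternative
-- what changed: Instead of A's single pass that selects a bucket per grade with an if/elif chain and increments a dict counter, B computes cumulative counts (how many grades lie below each threshold) with staged 0/1-sum passes and obtains each bucket as the difference of adjacent cumulative counts.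
import Mathlib
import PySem

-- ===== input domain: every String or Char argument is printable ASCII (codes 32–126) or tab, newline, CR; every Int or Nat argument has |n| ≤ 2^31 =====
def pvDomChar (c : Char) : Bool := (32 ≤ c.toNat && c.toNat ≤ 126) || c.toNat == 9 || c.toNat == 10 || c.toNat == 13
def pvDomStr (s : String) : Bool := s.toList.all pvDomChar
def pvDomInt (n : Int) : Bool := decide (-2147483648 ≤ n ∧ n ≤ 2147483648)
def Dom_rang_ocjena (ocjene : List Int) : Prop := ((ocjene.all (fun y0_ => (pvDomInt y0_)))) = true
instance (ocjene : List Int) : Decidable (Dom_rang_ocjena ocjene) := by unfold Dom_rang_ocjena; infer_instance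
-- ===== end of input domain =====

-- B replaces A's per-element if/elif bucketing by staged cumulative counts (grades below each
-- threshold) followed by adjacent differences (alternative decomposition; same asymptotic cost).

-- ===== PORT A =====
def rang_ocjena (ocjene : List Int) : List (String × Int) :=
  let rang : PySem.Dict String Int :=
    PySem.Dict.ofList [("Nedovoljan", 0), ("Dovoljan", 0), ("Dobar", 0), ("Vrlodobar", 0), ("Izvrstan", 0)]
  (ocjene.foldl (fun rang ocjena =>
    if ocjena < 50 then rang.modify "Nedovoljan" 0 (· + 1)
    else if ocjena < 65 then rang.modify "Dovoljan" 0 (· + 1)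
    else if ocjena < 80 then rang.modify "Dobar" 0 (· + 1)
    else if ocjena < 90 then rang.modify "Vrlodobar" 0 (· + 1)
    else rang.modify "Izvrstan" 0 (· + 1)) rang).items

-- ===== PORT B =====
def pvNames : List String := ["Nedovoljan", "Dovoljan", "Dobar", "Vrlodobar", "Izvrstan"]

def rang_ocjena_alt (ocjene : List Int) : List (String × Int) :=
  let cuts0 : List Int :=
    ([50, 65, 80, 90] : List Int).map
      (fun t => (ocjene.map (fun x => if x < t then (1 : Int) else 0)).sum)
  let cuts : List Int := 0 :: cuts0 ++ [(ocjene.length : Int)]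
  (PySem.Dict.ofList ((pvNames.zip (cuts.zip cuts.tail)).map
    (fun p => (p.1, p.2.2 - p.2.1)))).items

-- ===== PRECONDITION & SPEC =====
def Spec_rang_ocjena (ocjene : List Int) (out : List (String × Int)) : Prop := out = rang_ocjena_alt ocjene
instance (ocjene : List Int) (out : List (String × Int)) : Decidable (Spec_rang_ocjena ocjene out) := by unfold Spec_rang_ocjena; infer_instance

-- ===== CLAIM (what is proved, stated in full; the proofs are below) =====
def Claim_equal_rang_ocjena : Prop := ∀ (ocjene : List Int), Dom_rang_ocjena ocjene → Spec_rang_ocjena ocjene (rang_ocjena ocjene)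

-- ===== LEMMAS AND PROOFS =====

-- modify on the literal five-key dict, one lemma per key
lemma pv_mod1 (a b c d e : Int) :
    (PySem.Dict.ofList [("Nedovoljan", a), ("Dovoljan", b), ("Dobar", c), ("Vrlodobar", d), ("Izvrstan", e)]).modify "Nedovoljan" 0 (· + 1) =
    PySem.Dict.ofList [("Nedovoljan", a + 1), ("Dovoljan", b), ("Dobar", c), ("Vrlodobar", d), ("Izvrstan", e)] := by
  simp [PySem.Dict.ofList, PySem.Dict.empty, PySem.Dict.update, PySem.Dict.insert,
    PySem.Dict.get?, PySem.Dict.getD, PySem.Dict.modify]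

lemma pv_mod2 (a b c d e : Int) :
    (PySem.Dict.ofList [("Nedovoljan", a), ("Dovoljan", b), ("Dobar", c), ("Vrlodobar", d), ("Izvrstan", e)]).modify "Dovoljan" 0 (· + 1) =
    PySem.Dict.ofList [("Nedovoljan", a), ("Dovoljan", b + 1), ("Dobar", c), ("Vrlodobar", d), ("Izvrstan", e)] := by
  simp [PySem.Dict.ofList, PySem.Dict.empty, PySem.Dict.update, PySem.Dict.insert,
    PySem.Dict.get?, PySem.Dict.getD, PySem.Dict.modify]

lemma pv_mod3 (a b c d e : Int) :
    (PySem.Dict.ofList [("Nedovoljan", a), ("Dovoljan", b), ("Dobar", c), ("Vrlodobar", d), ("Izvrstan", e)]).modify "Dobar" 0 (· + 1) =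
    PySem.Dict.ofList [("Nedovoljan", a), ("Dovoljan", b), ("Dobar", c + 1), ("Vrlodobar", d), ("Izvrstan", e)] := by
  simp [PySem.Dict.ofList, PySem.Dict.empty, PySem.Dict.update, PySem.Dict.insert,
    PySem.Dict.get?, PySem.Dict.getD, PySem.Dict.modify]

lemma pv_mod4 (a b c d e : Int) :
    (PySem.Dict.ofList [("Nedovoljan", a), ("Dovoljan", b), ("Dobar", c), ("Vrlodobar", d), ("Izvrstan", e)]).modify "Vrlodobar" 0 (· + 1) =
    PySem.Dict.ofList [("Nedovoljan", a), ("Dovoljan", b), ("Dobar", c), ("Vrlodobar", d + 1), ("Izvrstan", e)] := by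
  simp [PySem.Dict.ofList, PySem.Dict.empty, PySem.Dict.update, PySem.Dict.insert,
    PySem.Dict.get?, PySem.Dict.getD, PySem.Dict.modify]

lemma pv_mod5 (a b c d e : Int) :
    (PySem.Dict.ofList [("Nedovoljan", a), ("Dovoljan", b), ("Dobar", c), ("Vrlodobar", d), ("Izvrstan", e)]).modify "Izvrstan" 0 (· + 1) =
    PySem.Dict.ofList [("Nedovoljan", a), ("Dovoljan", b), ("Dobar", c), ("Vrlodobar", d), ("Izvrstan", e + 1)] := by
  simp [PySem.Dict.ofList, PySem.Dict.empty, PySem.Dict.update, PySem.Dict.insert,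
    PySem.Dict.get?, PySem.Dict.getD, PySem.Dict.modify]

-- A's fold keeps the dict in literal five-key shape; its items are the five bucket counts.
lemma pv_A_items (l : List Int) (a b c d e : Int) :
    (l.foldl (fun rang ocjena =>
      if ocjena < 50 then rang.modify "Nedovoljan" 0 (· + 1)
      else if ocjena < 65 then rang.modify "Dovoljan" 0 (· + 1)
      else if ocjena < 80 then rang.modify "Dobar" 0 (· + 1)
      else if ocjena < 90 then rang.modify "Vrlodobar" 0 (· + 1)
      else rang.modify "Izvrstan" 0 (· + 1))
      (PySem.Dict.ofList [("Nedovoljan", a), ("Dovoljan", b), ("Dobar", c), ("Vrlodobar", d), ("Izvrstan", e)])).items =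
    [("Nedovoljan", a + (l.countP (fun x => decide (x < 50)) : Int)),
     ("Dovoljan", b + (l.countP (fun x => decide (50 ≤ x ∧ x < 65)) : Int)),
     ("Dobar", c + (l.countP (fun x => decide (65 ≤ x ∧ x < 80)) : Int)),
     ("Vrlodobar", d + (l.countP (fun x => decide (80 ≤ x ∧ x < 90)) : Int)),
     ("Izvrstan", e + (l.countP (fun x => decide (90 ≤ x)) : Int))] := by
  induction l generalizing a b c d e with
  | nil =>
    simp [PySem.Dict.ofList, PySem.Dict.empty, PySem.Dict.update, PySem.Dict.insert]
  | cons x xs ih =>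
    rw [List.foldl_cons]
    split_ifs with h1 h2 h3 h4
    · rw [pv_mod1, ih]
      simp only [List.countP_cons, decide_eq_true_eq, List.cons.injEq, Prod.mk.injEq]
      split_ifs <;> simp <;> omega
    · rw [pv_mod2, ih]
      simp only [List.countP_cons, decide_eq_true_eq, List.cons.injEq, Prod.mk.injEq]
      split_ifs <;> simp <;> omega
    · rw [pv_mod3, ih]
      simp only [List.countP_cons, decide_eq_true_eq, List.cons.injEq, Prod.mk.injEq]
      split_ifs <;> simp <;> omega
    · rw [pv_mod4, ih]
      simp only [List.countP_cons, decide_eq_true_eq, List.cons.injEq, Prod.mk.injEq]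
      split_ifs <;> simp <;> omega
    · rw [pv_mod5, ih]
      simp only [List.countP_cons, decide_eq_true_eq, List.cons.injEq, Prod.mk.injEq]
      split_ifs <;> simp <;> omega

-- countP splitting: adjacent buckets sum to the cumulative below-threshold counts.
lemma pv_split (l : List Int) (t u : Int) (h : t ≤ u) :
    l.countP (fun x => decide (x < t)) + l.countP (fun x => decide (t ≤ x) && decide (x < u)) =
    l.countP (fun x => decide (x < u)) := by
  induction l with
  | nil => rfl
  | cons x xs ih =>
    simp only [List.countP_cons, Bool.and_eq_true, decide_eq_true_eq]
    split_ifs <;> omega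

lemma pv_split_top (l : List Int) :
    l.countP (fun x => decide (x < 90)) + l.countP (fun x => decide (90 ≤ x)) = l.length := by
  induction l with
  | nil => rfl
  | cons x xs ih =>
    simp only [List.countP_cons, decide_eq_true_eq, List.length_cons]
    split_ifs <;> omega

-- ===== VERDICT (by name: the statement is the Claim_ definition above) =====
theorem rang_ocjena_spec : Claim_equal_rang_ocjena := by
  intro ocjene _
  unfold Spec_rang_ocjena rang_ocjena rang_ocjena_alt pvNames
  rw [pv_A_items]
  simp only [List.map_cons, List.map_nil, List.cons_append, List.nil_append, List.tail_cons,
    List.zip_cons_cons, List.zip_nil_right]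
  rw [show (fun (x:Int) => if x < (50:Int) then (1:Int) else 0) = (fun x => if (fun y => decide (y < (50:Int))) x = true then (1:Int) else 0) from by funext x; simp,
      show (fun (x:Int) => if x < (65:Int) then (1:Int) else 0) = (fun x => if (fun y => decide (y < (65:Int))) x = true then (1:Int) else 0) from by funext x; simp,
      show (fun (x:Int) => if x < (80:Int) then (1:Int) else 0) = (fun x => if (fun y => decide (y < (80:Int))) x = true then (1:Int) else 0) from by funext x; simp,
      show (fun (x:Int) => if x < (90:Int) then (1:Int) else 0) = (fun x => if (fun y => decide (y < (90:Int))) x = true then (1:Int) else 0) from by funext x; simp,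
      PySem.List.sum_map_ite_one_zero, PySem.List.sum_map_ite_one_zero,
      PySem.List.sum_map_ite_one_zero, PySem.List.sum_map_ite_one_zero]
  simp only [PySem.Dict.ofList, PySem.Dict.empty, PySem.Dict.update, PySem.Dict.insert,
    PySem.Dict.contains, List.foldl_cons, List.foldl_nil]
  simp
  have s1 := pv_split ocjene 50 65 (by norm_num)
  have s2 := pv_split ocjene 65 80 (by norm_num)
  have s3 := pv_split ocjene 80 90 (by norm_num)
  have s4 := pv_split_top ocjene
  omega
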